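-- pv_equiv track=rewrite | github.com/K-cermak/AOC-2023 | day13/13-1.py | check_reflection
-- ===== SOURCE A (Python) =====
-- def check_reflection(is_horizontal, game, i):
--     if is_horizontal:
--         left_index = i - 1
--         right_index = i + 2
--         while left_index >= 0 and right_index < len(game):
--             if game[left_index] != game[right_index]:
--                 return False
--             left_index -= 1
--             right_index += 1
--
--         return True
--
--     else:
--         top_index = i - 1
--         bottom_index = i + 2
--         while top_index >= 0 and bottom_index < len(game[0]):
--             left_row = []
--             right_row = []
--             for row in game:
--                 left_row.append(row[top_index])
--                 right_row.append(row[bottom_index])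
--             if left_row != right_row:
--                 return False
--             top_index -= 1
--             bottom_index += 1
--
--         return True
-- ===== SOURCE B (Python) =====
-- def check_reflection(is_horizontal, game, i):
--     if is_horizontal:
--         lines = game
--     else:
--         lines = [[row[j] for row in game] for j in range(len(game[0]))]
--     if i < 0:
--         return True
--     return all(a == b for a, b in zip(reversed(lines[:i]), lines[i + 2:]))
-- ===== Notes on version B (the rewrite author's own statement) =====
-- stated objective: simpler
-- what changed: B builds the list of lines once (rows, or the transposed columns) and runs a single zip-of-reversed-prefix-with-suffix pass for both cases, replacing A's duplicated two-index while loops and per-iteration column rebuilding.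
-- outside the precondition, e.g. on check_reflection(False, ['ab', 'a'], 0): A returns True, B raises IndexError; on check_reflection(False, ['abcdX', 'qbcd'], 1): A returns False, B raises IndexError
import Mathlib
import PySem

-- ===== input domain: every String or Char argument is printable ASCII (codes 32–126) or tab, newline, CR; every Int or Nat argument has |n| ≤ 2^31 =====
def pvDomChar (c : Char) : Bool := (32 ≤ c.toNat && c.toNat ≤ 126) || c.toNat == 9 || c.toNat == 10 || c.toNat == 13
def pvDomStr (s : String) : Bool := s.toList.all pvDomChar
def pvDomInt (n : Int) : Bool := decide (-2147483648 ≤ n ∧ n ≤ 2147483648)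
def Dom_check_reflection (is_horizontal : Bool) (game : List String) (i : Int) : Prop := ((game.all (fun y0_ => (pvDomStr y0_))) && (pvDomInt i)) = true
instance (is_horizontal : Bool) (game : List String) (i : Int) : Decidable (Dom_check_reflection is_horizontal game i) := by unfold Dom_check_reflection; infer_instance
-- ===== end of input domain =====

-- B builds the row/column lines once and runs one zip-of-reversed-prefix pass for both
-- cases, replacing A's two duplicated while loops and per-iteration column rebuild.

-- ===== PORT A =====
-- the horizontal while loop of A: while left_index >= 0 and right_index < len(game)
def pvLoopH (game : List String) (l r : Int) : Bool :=
  if h : 0 ≤ l ∧ r < (game.length : Int) then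
    -- inside the guard both indices are in range, so pyGet? returns some-values
    if PySem.List.pyGet? game l ≠ PySem.List.pyGet? game r then false
    else pvLoopH game (l - 1) (r + 1)
  else true
termination_by ((game.length : Int) - r).toNat
decreasing_by omega

-- the vertical while loop of A: builds left_row/right_row by one pass over the rows
-- (Pre_ guarantees every access is in range, so the Option values are all 'some')
def pvLoopV (game : List String) (w : Int) (t b : Int) : Bool :=
  if h : 0 ≤ t ∧ b < w then
    if game.map (fun row => PySem.Str.pyGet? row t) ≠ game.map (fun row => PySem.Str.pyGet? row b) then false
    else pvLoopV game w (t - 1) (b + 1)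
  else true
termination_by (w - b).toNat
decreasing_by omega

-- len(game[0]) raises IndexError on empty game; Pre_ excludes that, headD "" is a placeholder there
def check_reflection (is_horizontal : Bool) (game : List String) (i : Int) : Bool :=
  if is_horizontal then pvLoopH game (i - 1) (i + 2)
  else pvLoopV game ((game.headD "").length : Int) (i - 1) (i + 2)

-- ===== PORT B =====
-- lines = game (horizontal) or the list of columns built once (vertical);
-- getD ' ' is never reached under Pre_ (every row has length ≥ len(game[0]))
def pvLines (is_horizontal : Bool) (game : List String) : List (List Char) :=
  if is_horizontal then game.map String.toList
  else (List.range (game.headD "").length).map (fun j => game.map (fun row => (row.toList[j]?).getD ' '))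

-- all(a == b for a, b in zip(reversed(lines[:i]), lines[i+2:])); i < 0 returns True first,
-- so the slices below are taken at nonnegative i and are take/drop
def check_reflection_alt (is_horizontal : Bool) (game : List String) (i : Int) : Bool :=
  let lines := pvLines is_horizontal game
  if i < 0 then true
  else ((lines.take i.toNat).reverse.zip (lines.drop (i.toNat + 2))).all (fun p => p.1 == p.2)

-- ===== PRECONDITION & SPEC =====
-- Pre_ excludes only vertical-case inputs on which A's column indexing can raise: an empty
-- grid (len(game[0]) raises IndexError) and grids with a row shorter than the first row,
-- where A raises IndexError unless the loop happens to stop first (then B raises building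
-- the columns; such inputs are cited in the claim).
def Pre_check_reflection (is_horizontal : Bool) (game : List String) (i : Int) : Prop :=
  is_horizontal = true ∨ (game ≠ [] ∧ ∀ s ∈ game, (game.headD "").length ≤ s.length)
instance (is_horizontal : Bool) (game : List String) (i : Int) : Decidable (Pre_check_reflection is_horizontal game i) := by unfold Pre_check_reflection; infer_instance

def pvWitness_check_reflection : Bool × List String × Int := (false, ["ab", "ab", "cd"], 0)

def Spec_check_reflection (is_horizontal : Bool) (game : List String) (i : Int) (out : Bool) : Prop := out = check_reflection_alt is_horizontal game i
instance (is_horizontal : Bool) (game : List String) (i : Int) (out : Bool) : Decidable (Spec_check_reflection is_horizontal game i out) := by unfold Spec_check_reflection; infer_instance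

-- ===== CLAIM (what is proved, stated in full; the proofs are below) =====
def Claim_equal_check_reflection : Prop := ∀ (is_horizontal : Bool) (game : List String) (i : Int), Dom_check_reflection is_horizontal game i → Pre_check_reflection is_horizontal game i → Spec_check_reflection is_horizontal game i (check_reflection is_horizontal game i)

-- ===== LEMMAS AND PROOFS =====

-- the mirror pass on an arbitrary list, as B computes it
def pvPairs {α : Type} [BEq α] (L : List α) (ln rn : Nat) : Bool :=
  ((L.take ln).reverse.zip (L.drop rn)).all (fun p => p.1 == p.2)

theorem pvLoopH_eq (game : List String) (l r : Int) (hlr : l < r) (hr : 0 ≤ r) :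
    pvLoopH game l r = pvPairs game (l + 1).toNat r.toNat := by
  rw [pvLoopH]
  split
  · rename_i h
    obtain ⟨hl, hrlen⟩ := h
    have hln : l.toNat < game.length := by omega
    have hrn : r.toNat < game.length := by omega
    rw [PySem.List.pyGet?_eq_some_getElem game hl (by omega),
        PySem.List.pyGet?_eq_some_getElem game hr (by omega)]
    have htake : (l + 1).toNat = l.toNat + 1 := by omega
    have hrec := pvLoopH_eq game (l - 1) (r + 1) (by omega) (by omega)
    have hl1 : (l - 1 + 1).toNat = l.toNat := by omega
    have hr1 : (r + 1).toNat = r.toNat + 1 := by omega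
    rw [hl1, hr1] at hrec
    unfold pvPairs
    rw [htake, List.take_add_one, List.getElem?_eq_getElem hln,
        List.drop_eq_getElem_cons hrn]
    simp only [Option.toList_some, List.reverse_append, List.reverse_singleton,
      List.singleton_append, List.zip_cons_cons, List.all_cons]
    split
    · rename_i hne
      simp only [ne_eq, Option.some.injEq] at hne
      simp [hne]
    · rename_i heq
      simp only [ne_eq, Option.some.injEq, not_not] at heq
      rw [hrec]
      simp [heq, pvPairs]
  · rename_i h
    push Not at h
    unfold pvPairs
    rcases lt_or_ge l 0 with hneg | hpos
    · have : (l + 1).toNat = 0 ∨ ((l+1).toNat = 1 ∧ l = 0) := by omega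
      rcases this with h0 | ⟨_, _⟩
      · simp [h0]
      · omega
    · have := h hpos
      have : game.length ≤ r.toNat := by omega
      rw [List.drop_eq_nil_of_le this]
      simp
termination_by ((game.length : Int) - r).toNat
decreasing_by omega

-- PySem.Str.pyGet? at a nonnegative index is toList lookup
theorem pvStrGet (s : String) (i : Int) (h0 : 0 ≤ i) : PySem.Str.pyGet? s i = s.toList[i.toNat]? := by
  simp only [PySem.Str.pyGet?, PySem.Chars.pyGet?]
  exact PySem.List.pyGet?_of_nonneg _ h0

-- a column extracted with pyGet? equals the stored column of pvLines mapped through 'some'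
theorem pvCol_eq (game : List String) (hlen : ∀ s ∈ game, (game.headD "").length ≤ s.length)
    (j : Int) (hj0 : 0 ≤ j) (hjw : j < ((game.headD "").length : Int)) :
    game.map (fun row => PySem.Str.pyGet? row j)
      = (game.map (fun row => (row.toList[j.toNat]?).getD ' ')).map Option.some := by
  rw [List.map_map]
  apply List.map_congr_left
  intro row hrow
  have hrl : j.toNat < row.length := by
    have := hlen row hrow
    omega
  simp only [Function.comp_apply]
  rw [pvStrGet row j hj0]
  rw [List.getElem?_eq_getElem (by rw [String.length_toList]; omega)]
  rfl

theorem pvLoopV_eq (game : List String) (hlen : ∀ s ∈ game, (game.headD "").length ≤ s.length)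
    (t b : Int) (htb : t < b) (hb : 0 ≤ b) :
    pvLoopV game ((game.headD "").length : Int) t b
      = pvPairs (pvLines false game) (t + 1).toNat b.toNat := by
  have hlines : (pvLines false game).length = (game.headD "").length := by
    simp [pvLines]
  rw [pvLoopV]
  split
  · rename_i h
    obtain ⟨ht, hbw⟩ := h
    have htn : t.toNat < (pvLines false game).length := by rw [hlines]; omega
    have hbn : b.toNat < (pvLines false game).length := by rw [hlines]; omega
    rw [pvCol_eq game hlen t ht (by omega), pvCol_eq game hlen b hb (by omega)]
    have hrec := pvLoopV_eq game hlen (t - 1) (b + 1) (by omega) (by omega)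
    have hl1 : (t - 1 + 1).toNat = t.toNat := by omega
    have hr1 : (b + 1).toNat = b.toNat + 1 := by omega
    rw [hl1, hr1] at hrec
    have hcol : ∀ (j : Nat), (hj : j < (pvLines false game).length) →
        (pvLines false game)[j] = game.map (fun row => (row.toList[j]?).getD ' ') := by
      intro j hj
      simp [pvLines]
    have htake : (t + 1).toNat = t.toNat + 1 := by omega
    unfold pvPairs
    rw [htake, List.take_add_one, List.getElem?_eq_getElem htn,
        List.drop_eq_getElem_cons hbn, hcol t.toNat htn, hcol b.toNat hbn]
    simp only [Option.toList_some, List.reverse_append, List.reverse_singleton,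
      List.singleton_append, List.zip_cons_cons, List.all_cons]
    split
    · rename_i hne
      have hne' : game.map (fun row => (row.toList[t.toNat]?).getD ' ')
          ≠ game.map (fun row => (row.toList[b.toNat]?).getD ' ') := by
        intro hcontra
        exact hne (by rw [hcontra])
      simp [hne']
    · rename_i heq
      rw [not_not] at heq
      have heq' : game.map (fun row => (row.toList[t.toNat]?).getD ' ')
          = game.map (fun row => (row.toList[b.toNat]?).getD ' ') :=
        List.map_injective_iff.mpr (fun _ _ => Option.some.inj) heq
      rw [hrec]
      simp [heq', pvPairs]
  · rename_i h
    push Not at h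
    unfold pvPairs
    rcases lt_or_ge t 0 with hneg | hpos
    · have h0 : (t + 1).toNat = 0 ∨ ((t + 1).toNat = 1 ∧ t = 0) := by omega
      rcases h0 with h0 | ⟨_, _⟩
      · simp [h0]
      · omega
    · have := h hpos
      have hd : (pvLines false game).length ≤ b.toNat := by omega
      rw [List.drop_eq_nil_of_le hd]
      simp
termination_by (((game.headD "").length : Int) - b).toNat
decreasing_by omega

theorem string_beq_toList (a b : String) : (a.toList == b.toList) = (a == b) := by
  by_cases h : a = b
  · simp [h]
  · have : a.toList ≠ b.toList := by simpa [String.toList_inj] using h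
    simp [h, this]

-- ===== VERDICT (by name: the statement is the Claim_ definition above) =====
-- B's horizontal pass over game.map String.toList equals the pass over the strings
theorem pvPairs_map (game : List String) (m n : Nat) :
    pvPairs (game.map String.toList) m n = pvPairs game m n := by
  unfold pvPairs
  rw [← List.map_take, ← List.map_drop, ← List.map_reverse,
      List.zip_map, List.all_map]
  congr 1
  funext p
  exact string_beq_toList p.1 p.2

theorem check_reflection_spec : Claim_equal_check_reflection := by
  intro is_horizontal game i _ hpre
  unfold Spec_check_reflection check_reflection check_reflection_alt
  cases is_horizontal with
  | true =>
    simp only []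
    rcases lt_or_ge i 0 with hneg | hpos
    · rw [pvLoopH, dif_neg (by omega : ¬ (0 ≤ i - 1 ∧ i + 2 < ((game.length : Nat) : Int))), if_pos hneg]
      simp
    · have hA := pvLoopH_eq game (i - 1) (i + 2) (by omega) (by omega)
      have h1 : (i - 1 + 1).toNat = i.toNat := by omega
      have h2 : (i + 2).toNat = i.toNat + 2 := by omega
      rw [h1, h2] at hA
      rw [hA, if_neg (by omega : ¬ i < 0)]
      show pvPairs game i.toNat (i.toNat + 2) = pvPairs (pvLines true game) i.toNat (i.toNat + 2)
      rw [show pvLines true game = game.map String.toList from rfl, pvPairs_map]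
  | false =>
    have hv : game ≠ [] ∧ ∀ s ∈ game, (game.headD "").length ≤ s.length := by
      rcases hpre with h | h
      · exact absurd h (by simp)
      · exact h
    simp only [Bool.false_eq_true, if_neg (by simp : ¬ (false = true))]
    rcases lt_or_ge i 0 with hneg | hpos
    · rw [pvLoopV, dif_neg (by omega : ¬ (0 ≤ i - 1 ∧ i + 2 < (((game.headD "").length : Nat) : Int))), if_pos hneg]
      simp
    · have hA := pvLoopV_eq game hv.2 (i - 1) (i + 2) (by omega) (by omega)
      have h1 : (i - 1 + 1).toNat = i.toNat := by omega
      have h2 : (i + 2).toNat = i.toNat + 2 := by omega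
      rw [h1, h2] at hA
      rw [hA, if_neg (by omega : ¬ i < 0)]
      rfl
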